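-- pv_equiv track=rewrite | github.com/MarcinVaadin/advent-of-code-2025 | day04.py | findToBeRemoved
-- ===== SOURCE A (Python) =====
-- def countAvailableSpace(matrix, i, j, max_i, max_j):
--     sum = 0
--     for i_i in range(i - 1 , i + 2):
--         for j_j in range(j - 1 , j + 2):
--             # dont count itself
--             if i_i == i and j_j == j:
--                 continue
--             # count out of array as available space
--             if i_i < 0 or j_j < 0 or i_i >= max_i or j_j >= max_j:
--                 sum += 1
--                 continue
--             # count in array '.'
--             if matrix[i_i][j_j] == '.':
--                 sum += 1
--     return sum
--
-- def findToBeRemoved(matrix):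
--     max_i = len(matrix)
--     max_j = len(matrix[0])
--     to_be_removed = []
--     for i in range(0, max_i):
--         for j in range(0, max_j):
--             if matrix[i][j] == '@':
--                 space = countAvailableSpace(matrix, i, j, max_i, max_j)
--                 if space > 4:
--                     to_be_removed.append((i, j))
--     return to_be_removed
-- ===== SOURCE B (Python) =====
-- def findToBeRemoved(matrix):
--     h = len(matrix)
--     w = len(matrix[0])
--     # Precompute, per row, the number of blocked (non-'.') in-grid cells in each
--     # 3-wide column window; a cell's free-neighbour count is then 8 minus the
--     # blocked cells in its 3x3 window (minus itself).
--     tbl = [window3(w, [0 if c == '.' else 1 for c in row[:w]]) for row in matrix]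
--     zero = [0] * w
--     out = []
--     for i in range(h):
--         row = matrix[i]
--         above = tbl[i - 1] if i > 0 else zero
--         cur = tbl[i]
--         below = tbl[i + 1] if i + 1 < h else zero
--         for j in range(w):
--             if row[j] == '@':
--                 blocked = above[j] + cur[j] + below[j] - 1  # the centre '@' itself is blocked
--                 if 8 - blocked > 4:
--                     out.append((i, j))
--     return out
--
-- def window3(w, bits):
--     return [(bits[j - 1] if j > 0 else 0) + bits[j] + (bits[j + 1] if j + 1 < w else 0)
--             for j in range(w)]
-- ===== Notes on version B (the rewrite author's own statement) =====
-- stated objective: alternative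
-- what changed: Replaces the per-'@' 3x3 rescan by a precomputed per-row table of 3-wide blocked-cell window sums, so each cell's free-neighbour count is obtained from three table lookups as 8 minus blocked neighbours.
import Mathlib
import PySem

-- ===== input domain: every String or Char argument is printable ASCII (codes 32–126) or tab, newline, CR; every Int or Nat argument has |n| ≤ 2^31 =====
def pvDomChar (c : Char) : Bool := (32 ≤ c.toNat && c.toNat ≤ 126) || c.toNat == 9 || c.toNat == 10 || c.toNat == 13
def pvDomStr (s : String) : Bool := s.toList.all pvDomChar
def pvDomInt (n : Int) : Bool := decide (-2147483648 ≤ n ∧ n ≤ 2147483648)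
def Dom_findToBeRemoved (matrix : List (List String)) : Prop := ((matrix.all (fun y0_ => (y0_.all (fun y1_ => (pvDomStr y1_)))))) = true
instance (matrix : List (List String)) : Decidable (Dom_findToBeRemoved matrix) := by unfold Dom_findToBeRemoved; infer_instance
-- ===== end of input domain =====

-- B replaces A's per-'@' 3x3 rescan by a precomputed per-row table of 3-wide blocked-cell
-- window sums (free neighbours = 8 - blocked neighbours); alternative decomposition, same asymptotics.

-- ===== PORT A =====
def countAvailableSpace (matrix : List (List String)) (i j max_i max_j : Int) : Int :=
  (PySem.List.pyRange (i - 1) (i + 2) 1).foldl (fun s i_i =>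
    (PySem.List.pyRange (j - 1) (j + 2) 1).foldl (fun s j_j =>
      if i_i = i ∧ j_j = j then s
      else if i_i < 0 ∨ j_j < 0 ∨ i_i ≥ max_i ∨ j_j ≥ max_j then s + 1
      else if PySem.List.pyGetD (PySem.List.pyGetD matrix i_i []) j_j "" = "." then s + 1
      else s) s) 0

def findToBeRemoved (matrix : List (List String)) : List (Int × Int) :=
  let max_i : Int := matrix.length
  let max_j : Int := (PySem.List.pyGetD matrix 0 []).length   -- Python raises on matrix = []; excluded by Pre_
  (PySem.List.pyRange 0 max_i 1).foldl (fun acc i =>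
    (PySem.List.pyRange 0 max_j 1).foldl (fun acc j =>
      if PySem.List.pyGetD (PySem.List.pyGetD matrix i []) j "" = "@" then
        if countAvailableSpace matrix i j max_i max_j > 4 then acc ++ [(i, j)] else acc
      else acc) acc) []

-- ===== PORT B =====
def pvWin3 (w : Int) (bits : List Int) : List Int :=
  (PySem.List.pyRange 0 w 1).map (fun j =>
    (if 0 < j then PySem.List.pyGetD bits (j - 1) 0 else 0) + PySem.List.pyGetD bits j 0 +
    (if j + 1 < w then PySem.List.pyGetD bits (j + 1) 0 else 0))

def findToBeRemoved_alt (matrix : List (List String)) : List (Int × Int) :=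
  let h : Int := matrix.length
  let w : Int := (PySem.List.pyGetD matrix 0 []).length
  let tbl := matrix.map (fun row =>
    pvWin3 w ((PySem.List.slice row none (some w)).map (fun c => if c = "." then (0 : Int) else 1)))
  let zero := List.replicate w.toNat (0 : Int)
  (PySem.List.pyRange 0 h 1).foldl (fun acc i =>
    let row := PySem.List.pyGetD matrix i []
    let above := if 0 < i then PySem.List.pyGetD tbl (i - 1) [] else zero
    let cur := PySem.List.pyGetD tbl i []
    let below := if i + 1 < h then PySem.List.pyGetD tbl (i + 1) [] else zero
    (PySem.List.pyRange 0 w 1).foldl (fun acc j =>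
      if PySem.List.pyGetD row j "" = "@" then
        if 8 - (PySem.List.pyGetD above j 0 + PySem.List.pyGetD cur j 0 + PySem.List.pyGetD below j 0 - 1) > 4 then
          acc ++ [(i, j)]
        else acc
      else acc) acc) []

-- ===== PRECONDITION & SPEC =====
-- Pre_ excludes exactly the inputs where Python A raises IndexError: the empty matrix
-- (len(matrix[0])) and matrices with a row shorter than row 0 (matrix[i][j] for j < max_j).
def Pre_findToBeRemoved (matrix : List (List String)) : Prop :=
  matrix ≠ [] ∧ ∀ row ∈ matrix, (PySem.List.pyGetD matrix 0 []).length ≤ row.length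
instance (matrix : List (List String)) : Decidable (Pre_findToBeRemoved matrix) := by
  unfold Pre_findToBeRemoved; infer_instance
def pvWitness_findToBeRemoved : List (List String) := [["@", "."], [".", "."]]
def Spec_findToBeRemoved (matrix : List (List String)) (out : List (Int × Int)) : Prop := out = findToBeRemoved_alt matrix
instance (matrix : List (List String)) (out : List (Int × Int)) : Decidable (Spec_findToBeRemoved matrix out) := by unfold Spec_findToBeRemoved; infer_instance

-- ===== CLAIM (what is proved, stated in full; the proofs are below) =====
def Claim_equal_findToBeRemoved : Prop := ∀ (matrix : List (List String)), Dom_findToBeRemoved matrix → Pre_findToBeRemoved matrix → Spec_findToBeRemoved matrix (findToBeRemoved matrix)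

-- ===== LEMMAS AND PROOFS =====

-- blocked indicator: 1 iff (a,b) is in the grid window [0,h)x[0,w) and the cell is not '.'
def pvT (matrix : List (List String)) (h w a b : Int) : Int :=
  if 0 ≤ a ∧ a < h ∧ 0 ≤ b ∧ b < w ∧ PySem.List.pyGetD (PySem.List.pyGetD matrix a []) b "" ≠ "." then 1 else 0

-- free indicator, exactly A's per-neighbour contribution
def pvTA (matrix : List (List String)) (h w a b : Int) : Int :=
  if a < 0 ∨ b < 0 ∨ a ≥ h ∨ b ≥ w then 1
  else if PySem.List.pyGetD (PySem.List.pyGetD matrix a []) b "" = "." then 1 else 0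

theorem pvTA_eq (matrix : List (List String)) (h w a b : Int) :
    pvTA matrix h w a b = 1 - pvT matrix h w a b := by
  unfold pvTA pvT
  by_cases hout : a < 0 ∨ b < 0 ∨ a ≥ h ∨ b ≥ w
  · rw [if_pos hout, if_neg (fun hcj => by omega)]; norm_num
  · rw [if_neg hout]
    by_cases hc : PySem.List.pyGetD (PySem.List.pyGetD matrix a []) b "" = "."
    · rw [if_pos hc, if_neg (fun hcj => hcj.2.2.2.2 hc)]; norm_num
    · rw [if_neg hc, if_pos ⟨by omega, by omega, by omega, by omega, hc⟩]; norm_num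

theorem pvT_out (matrix : List (List String)) (h w a b : Int)
    (hab : a < 0 ∨ h ≤ a ∨ b < 0 ∨ w ≤ b) : pvT matrix h w a b = 0 := by
  unfold pvT
  rw [if_neg (fun hcj => by omega)]

theorem pvRange_three (a : Int) : PySem.List.pyRange (a - 1) (a + 2) 1 = [a - 1, a, a + 1] := by
  rw [PySem.List.pyRange_one_cons (by omega)]
  rw [show a - 1 + 1 = a by ring]
  rw [PySem.List.pyRange_one_cons (by omega)]
  rw [PySem.List.pyRange_one_cons (by omega)]
  rw [PySem.List.pyRange_one_eq_nil (by omega)]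

theorem pvAstep (matrix : List (List String)) (i j h w s a b : Int) :
    (if a = i ∧ b = j then s
     else if a < 0 ∨ b < 0 ∨ a ≥ h ∨ b ≥ w then s + 1
     else if PySem.List.pyGetD (PySem.List.pyGetD matrix a []) b "" = "." then s + 1
     else s) = s + (if a = i ∧ b = j then 0 else pvTA matrix h w a b) := by
  unfold pvTA
  by_cases hc : a = i ∧ b = j
  · rw [if_pos hc, if_pos hc]; ring
  · rw [if_neg hc, if_neg hc]
    by_cases ho : a < 0 ∨ b < 0 ∨ a ≥ h ∨ b ≥ w
    · rw [if_pos ho, if_pos ho]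
    · rw [if_neg ho, if_neg ho]
      by_cases hd : PySem.List.pyGetD (PySem.List.pyGetD matrix a []) b "" = "."
      · rw [if_pos hd, if_pos hd]
      · rw [if_neg hd, if_neg hd]; ring

theorem pvRow (matrix : List (List String)) (i j h w a s : Int) :
    List.foldl (fun s j_j =>
      if a = i ∧ j_j = j then s
      else if a < 0 ∨ j_j < 0 ∨ a ≥ h ∨ j_j ≥ w then s + 1
      else if PySem.List.pyGetD (PySem.List.pyGetD matrix a []) j_j "" = "." then s + 1
      else s) s [j - 1, j, j + 1] =
      s + (if a = i ∧ j - 1 = j then 0 else pvTA matrix h w a (j - 1))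
        + (if a = i ∧ j = j then 0 else pvTA matrix h w a j)
        + (if a = i ∧ j + 1 = j then 0 else pvTA matrix h w a (j + 1)) := by
  rw [List.foldl_cons, List.foldl_cons, List.foldl_cons, List.foldl_nil]
  rw [pvAstep, pvAstep, pvAstep]

theorem count_eq_sum (matrix : List (List String)) (i j h w : Int)
    (hc : PySem.List.pyGetD (PySem.List.pyGetD matrix i []) j "" = "@")
    (hi : 0 ≤ i ∧ i < h) (hj : 0 ≤ j ∧ j < w) :
    countAvailableSpace matrix i j h w =
      (pvTA matrix h w (i-1) (j-1) + pvTA matrix h w (i-1) j + pvTA matrix h w (i-1) (j+1)) +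
      (pvTA matrix h w i (j-1) + pvTA matrix h w i j + pvTA matrix h w i (j+1)) +
      (pvTA matrix h w (i+1) (j-1) + pvTA matrix h w (i+1) j + pvTA matrix h w (i+1) (j+1)) := by
  have hTAij : pvTA matrix h w i j = 0 := by
    unfold pvTA
    rw [if_neg (by omega), if_neg (by rw [hc]; decide)]
  unfold countAvailableSpace
  rw [pvRange_three i, pvRange_three j]
  rw [List.foldl_cons, List.foldl_cons, List.foldl_cons, List.foldl_nil]
  rw [pvRow, pvRow, pvRow]
  rw [if_neg (by omega : ¬(i - 1 = i ∧ j - 1 = j)), if_neg (by omega : ¬(i - 1 = i ∧ j = j)),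
      if_neg (by omega : ¬(i - 1 = i ∧ j + 1 = j)), if_neg (by omega : ¬(i = i ∧ j - 1 = j)),
      if_pos (⟨rfl, rfl⟩ : i = i ∧ j = j), if_neg (by omega : ¬(i = i ∧ j + 1 = j)),
      if_neg (by omega : ¬(i + 1 = i ∧ j - 1 = j)), if_neg (by omega : ¬(i + 1 = i ∧ j = j)),
      if_neg (by omega : ¬(i + 1 = i ∧ j + 1 = j))]
  rw [hTAij]
  ring

theorem pyGetD_zero_list (w : Nat) (j : Int) :
    PySem.List.pyGetD (List.replicate w (0 : Int)) j 0 = 0 := by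
  simp only [PySem.List.pyGetD, PySem.List.pyGet?, PySem.List.pyIdx?]
  split_ifs <;> simp

theorem bits_val (row : List String) (w : Nat) (hw : w ≤ row.length) (b : Int)
    (hb : 0 ≤ b ∧ b < (w : Int)) :
    PySem.List.pyGetD ((PySem.List.slice row none (some (w : Int))).map
      (fun c => if c = "." then (0 : Int) else 1)) b 0 =
      if PySem.List.pyGetD row b "" ≠ "." then 1 else 0 := by
  obtain ⟨hb0, hbw⟩ := hb
  lift b to ℕ using hb0 with n
  have hn : n < w := by exact_mod_cast hbw
  rw [PySem.List.slice_to_natCast, PySem.List.pyGetD_natCast, PySem.List.pyGetD_natCast]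
  rw [List.getD_eq_getElem _ _ (by simp; omega), List.getD_eq_getElem _ _ (by omega)]
  rw [List.getElem_map, List.getElem_take]
  split_ifs <;> simp_all

theorem tbl_row (matrix : List (List String)) (w : Nat)
    (hp : ∀ row ∈ matrix, w ≤ row.length) (a j : Int)
    (ha : 0 ≤ a ∧ a < (matrix.length : Int)) (hj : 0 ≤ j ∧ j < (w : Int)) :
    PySem.List.pyGetD (PySem.List.pyGetD (matrix.map (fun row =>
      pvWin3 (w : Int) ((PySem.List.slice row none (some (w : Int))).map
        (fun c => if c = "." then (0 : Int) else 1)))) a []) j 0 =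
      pvT matrix (matrix.length) (w : Int) a (j-1) + pvT matrix (matrix.length) (w : Int) a j +
      pvT matrix (matrix.length) (w : Int) a (j+1) := by
  obtain ⟨ha0, hah⟩ := ha
  lift a to ℕ using ha0 with na
  have hna : na < matrix.length := by exact_mod_cast hah
  have hrow : PySem.List.pyGetD matrix (na : Int) [] = matrix[na] := by
    rw [PySem.List.pyGetD_natCast, List.getD_eq_getElem _ _ hna]
  have hwrow : w ≤ matrix[na].length := hp _ (List.getElem_mem hna)
  have pvT_in : ∀ b : Int, 0 ≤ b → b < (w : Int) →
      pvT matrix (matrix.length) (w : Int) (na : Int) b =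
        if PySem.List.pyGetD matrix[na] b "" ≠ "." then 1 else 0 := by
    intro b hb0 hbw
    unfold pvT
    rw [hrow]
    by_cases hc : PySem.List.pyGetD matrix[na] b "" ≠ "."
    · rw [if_pos ⟨by omega, by exact_mod_cast hah, hb0, hbw, hc⟩, if_pos hc]
    · rw [if_neg (fun hcj => hc hcj.2.2.2.2), if_neg hc]
  have pvT_out' : ∀ b : Int, (b < 0 ∨ (w : Int) ≤ b) →
      pvT matrix (matrix.length) (w : Int) (na : Int) b = 0 := by
    intro b hb
    exact pvT_out _ _ _ _ _ (by omega)
  have hmap : PySem.List.pyGetD (matrix.map (fun row =>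
      pvWin3 (w : Int) ((PySem.List.slice row none (some (w : Int))).map
        (fun c => if c = "." then (0 : Int) else 1)))) (na : Int) [] =
      pvWin3 (w : Int) ((PySem.List.slice matrix[na] none (some (w : Int))).map
        (fun c => if c = "." then (0 : Int) else 1)) := by
    rw [PySem.List.pyGetD_natCast, List.getD_eq_getElem _ _ (by simpa using hna), List.getElem_map]
  rw [hmap]
  unfold pvWin3
  rw [PySem.List.pyGetD_map_pyRange_of_nonneg _ _ _ _ hj.1 (by exact_mod_cast hj.2)]
  have e2 := bits_val matrix[na] w hwrow j hj
  rw [e2, pvT_in j hj.1 hj.2]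
  by_cases h1 : 0 < j
  · rw [if_pos h1, bits_val matrix[na] w hwrow (j-1) ⟨by omega, by omega⟩,
        pvT_in (j-1) (by omega) (by omega)]
    by_cases h3 : j + 1 < (w : Int)
    · rw [if_pos h3, bits_val matrix[na] w hwrow (j+1) ⟨by omega, h3⟩,
          pvT_in (j+1) (by omega) h3]
    · rw [if_neg h3, pvT_out' (j+1) (by omega)]
  · rw [if_neg h1, pvT_out' (j-1) (by omega)]
    by_cases h3 : j + 1 < (w : Int)
    · rw [if_pos h3, bits_val matrix[na] w hwrow (j+1) ⟨by omega, h3⟩,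
          pvT_in (j+1) (by omega) h3]
    · rw [if_neg h3, pvT_out' (j+1) (by omega)]

-- ===== VERDICT (by name: the statement is the Claim_ definition above) =====
theorem findToBeRemoved_spec : Claim_equal_findToBeRemoved := by
  intro matrix _ hpre
  obtain ⟨hne, hrows⟩ := hpre
  unfold Spec_findToBeRemoved findToBeRemoved findToBeRemoved_alt
  apply PySem.List.foldl_congr_mem
  intro acc i hi
  rw [PySem.List.mem_pyRange_one] at hi
  apply PySem.List.foldl_congr_mem
  intro acc2 j hj
  rw [PySem.List.mem_pyRange_one] at hj
  by_cases hat : PySem.List.pyGetD (PySem.List.pyGetD matrix i []) j "" = "@"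
  · rw [if_pos hat, if_pos hat]
    have hcnt := count_eq_sum matrix i j (matrix.length) ((PySem.List.pyGetD matrix 0 []).length)
      hat ⟨hi.1, hi.2⟩ ⟨hj.1, hj.2⟩
    have hcur := tbl_row matrix _ hrows i j ⟨hi.1, hi.2⟩ ⟨hj.1, hj.2⟩
    have habove : PySem.List.pyGetD (if 0 < i then PySem.List.pyGetD (matrix.map (fun row =>
        pvWin3 ((PySem.List.pyGetD matrix 0 []).length : Int)
          ((PySem.List.slice row none (some ((PySem.List.pyGetD matrix 0 []).length : Int))).map
            (fun c => if c = "." then (0 : Int) else 1)))) (i - 1) []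
        else List.replicate ((PySem.List.pyGetD matrix 0 []).length : Int).toNat (0 : Int)) j 0 =
        pvT matrix (matrix.length) ((PySem.List.pyGetD matrix 0 []).length) (i-1) (j-1) +
        pvT matrix (matrix.length) ((PySem.List.pyGetD matrix 0 []).length) (i-1) j +
        pvT matrix (matrix.length) ((PySem.List.pyGetD matrix 0 []).length) (i-1) (j+1) := by
      by_cases h0 : 0 < i
      · rw [if_pos h0, tbl_row matrix _ hrows (i-1) j ⟨by omega, by omega⟩ ⟨hj.1, hj.2⟩]
      · rw [if_neg h0, pyGetD_zero_list,
            pvT_out _ _ _ _ _ (by omega), pvT_out _ _ _ _ _ (by omega), pvT_out _ _ _ _ _ (by omega)]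
        ring
    have hbelow : PySem.List.pyGetD (if i + 1 < (matrix.length : Int) then
        PySem.List.pyGetD (matrix.map (fun row =>
        pvWin3 ((PySem.List.pyGetD matrix 0 []).length : Int)
          ((PySem.List.slice row none (some ((PySem.List.pyGetD matrix 0 []).length : Int))).map
            (fun c => if c = "." then (0 : Int) else 1)))) (i + 1) []
        else List.replicate ((PySem.List.pyGetD matrix 0 []).length : Int).toNat (0 : Int)) j 0 =
        pvT matrix (matrix.length) ((PySem.List.pyGetD matrix 0 []).length) (i+1) (j-1) +
        pvT matrix (matrix.length) ((PySem.List.pyGetD matrix 0 []).length) (i+1) j +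
        pvT matrix (matrix.length) ((PySem.List.pyGetD matrix 0 []).length) (i+1) (j+1) := by
      by_cases h0 : i + 1 < (matrix.length : Int)
      · rw [if_pos h0, tbl_row matrix _ hrows (i+1) j ⟨by omega, by omega⟩ ⟨hj.1, hj.2⟩]
      · rw [if_neg h0, pyGetD_zero_list,
            pvT_out _ _ _ _ _ (by omega), pvT_out _ _ _ _ _ (by omega), pvT_out _ _ _ _ _ (by omega)]
        ring
    rw [hcnt, habove, hcur, hbelow]
    simp only [pvTA_eq]
    ring_nf
  · rw [if_neg hat, if_neg hat]
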